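-- pv_equiv track=rewrite | github.com/miliar/Code_Jam_Webscraper | solutions_python/Problem_203/724.py | maxWidthFrom
-- ===== SOURCE A (Python) =====
-- def maxWidthFrom(cake, r, c, allowed) -> (int, str): # width, initial
--     initial = None
--
--     for col in range(c, len(cake[r])):
--         if cake[r][col] != '?' and cake[r][col] not in allowed:
--             return (col - c), initial
--         if cake[r][col] != '?' and initial is None:
--             initial = cake[r][col]
--         elif cake[r][col] != '?':
--             return (col - c), initial
--
--     return len(cake[r]) - c, initial
-- ===== SOURCE B (Python) =====
-- def maxWidthFrom(cake, r, c, allowed):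
--     row = cake[r]
--     n = len(row)
--     # full pass: all non-'?' column indices in [c, n); no early exit, no loop state
--     marks = [col for col in range(c, n) if row[col] != '?']
--     if not marks:
--         return n - c, None
--     first = marks[0]
--     if row[first] not in allowed:
--         return first - c, None
--     initial = row[first]
--     if len(marks) == 1:
--         return n - c, initial
--     return marks[1] - c, initial
-- ===== Notes on version B (the rewrite author's own statement) =====
-- stated objective: alternative
-- what changed: A is an early-exit flag-carrying scan; B makes one exhaustive pass collecting the list of all non-'?' column indices and then computes the answer by case analysis on the first two entries of that list, with no early exit and no loop state.
import Mathlib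
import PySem

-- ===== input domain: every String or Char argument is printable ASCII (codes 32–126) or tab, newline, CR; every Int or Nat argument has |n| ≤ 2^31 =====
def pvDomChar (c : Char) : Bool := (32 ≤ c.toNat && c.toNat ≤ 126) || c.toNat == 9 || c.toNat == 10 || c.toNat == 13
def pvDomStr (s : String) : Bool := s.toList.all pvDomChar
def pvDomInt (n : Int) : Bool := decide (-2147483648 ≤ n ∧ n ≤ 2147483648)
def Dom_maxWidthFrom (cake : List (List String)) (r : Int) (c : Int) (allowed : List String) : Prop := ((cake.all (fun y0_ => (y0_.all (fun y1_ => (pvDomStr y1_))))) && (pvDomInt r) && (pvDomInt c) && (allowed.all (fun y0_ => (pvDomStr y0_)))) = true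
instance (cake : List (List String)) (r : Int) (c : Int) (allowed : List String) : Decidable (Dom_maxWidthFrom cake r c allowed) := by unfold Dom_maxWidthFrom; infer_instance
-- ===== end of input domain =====

-- B replaces A's early-exit flag-carrying scan by one exhaustive pass collecting all non-'?'
-- column indices, then a case analysis on the first two entries (alternative algorithm, same cost).

-- ===== PORT A =====
-- the for-loop of A: recursion over the range list, carrying `initial`
def pvGoA (row : List String) (allowed : List String) (c : Int) : List Int → Option String → Int × Option String
  | [], initial => ((row.length : Int) - c, initial)
  | col :: rest, initial =>
    let ch := PySem.List.pyGetD row col ""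
    if ch ≠ "?" ∧ ¬ allowed.contains ch then (col - c, initial)
    else if ch ≠ "?" ∧ initial = none then pvGoA row allowed c rest (some ch)
    else if ch ≠ "?" then (col - c, initial)
    else pvGoA row allowed c rest initial

def maxWidthFrom (cake : List (List String)) (r : Int) (c : Int) (allowed : List String) : Int × Option String :=
  let row := (PySem.List.pyGet? cake r).getD []
  pvGoA row allowed c (PySem.List.pyRange c (row.length : Int) 1) none

-- ===== PORT B =====
def maxWidthFrom_alt (cake : List (List String)) (r : Int) (c : Int) (allowed : List String) : Int × Option String :=
  let row := (PySem.List.pyGet? cake r).getD []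
  let n : Int := row.length
  let marks := (PySem.List.pyRange c n 1).filter (fun col => PySem.List.pyGetD row col "" ≠ "?")
  match marks with
  | [] => (n - c, none)
  | first :: rest =>
    if ¬ allowed.contains (PySem.List.pyGetD row first "") then (first - c, none)
    else
      let initial := PySem.List.pyGetD row first ""
      match rest with
      | [] => (n - c, some initial)
      | second :: _ => (second - c, some initial)

-- ===== PRECONDITION & SPEC =====
-- Pre_ excludes exactly the inputs where A raises an IndexError: row index r out of Python range,
-- or start column c below -len(cake[r]) (the first accessed index is out of range).
def Pre_maxWidthFrom (cake : List (List String)) (r : Int) (c : Int) (allowed : List String) : Prop :=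
  (PySem.List.pyGet? cake r).isSome = true ∧
    -((((PySem.List.pyGet? cake r).getD []).length : Int)) ≤ c
instance (cake : List (List String)) (r : Int) (c : Int) (allowed : List String) : Decidable (Pre_maxWidthFrom cake r c allowed) := by unfold Pre_maxWidthFrom; infer_instance

def pvWitness_maxWidthFrom : List (List String) × Int × Int × List String :=
  ([["?", "A", "?", "B"]], 0, 0, ["A"])

def Spec_maxWidthFrom (cake : List (List String)) (r : Int) (c : Int) (allowed : List String) (out : Int × Option String) : Prop := out = maxWidthFrom_alt cake r c allowed
instance (cake : List (List String)) (r : Int) (c : Int) (allowed : List String) (out : Int × Option String) : Decidable (Spec_maxWidthFrom cake r c allowed out) := by unfold Spec_maxWidthFrom; infer_instance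

-- ===== CLAIM (what is proved, stated in full; the proofs are below) =====
def Claim_equal_maxWidthFrom : Prop := ∀ (cake : List (List String)) (r : Int) (c : Int) (allowed : List String), Dom_maxWidthFrom cake r c allowed → Pre_maxWidthFrom cake r c allowed → Spec_maxWidthFrom cake r c allowed (maxWidthFrom cake r c allowed)

-- ===== LEMMAS AND PROOFS =====

-- A's loop with `initial` already set stops at the next non-'?' column regardless of membership:
-- it returns according to the head of the filtered remainder.
theorem pvGoA_some (row allowed : List String) (c : Int) (ch : String) :
    ∀ L : List Int, pvGoA row allowed c L (some ch) =
      (match L.filter (fun col => PySem.List.pyGetD row col "" ≠ "?") with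
       | [] => ((row.length : Int) - c, some ch)
       | j :: _ => (j - c, some ch)) := by
  intro L
  induction L with
  | nil => simp [pvGoA]
  | cons col rest ih =>
    simp only [pvGoA, List.filter_cons]
    by_cases h : PySem.List.pyGetD row col "" = "?"
    · simp [h, ih]
    · simp [h]

-- A's loop with `initial = None` equals B's case analysis on the filtered list.
theorem pvGoA_none (row allowed : List String) (c : Int) :
    ∀ L : List Int, pvGoA row allowed c L none =
      (match L.filter (fun col => PySem.List.pyGetD row col "" ≠ "?") with
       | [] => ((row.length : Int) - c, none)
       | first :: rest =>
         if ¬ allowed.contains (PySem.List.pyGetD row first "") then (first - c, none)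
         else
           match rest with
           | [] => ((row.length : Int) - c, some (PySem.List.pyGetD row first ""))
           | second :: _ => (second - c, some (PySem.List.pyGetD row first ""))) := by
  intro L
  induction L with
  | nil => simp [pvGoA]
  | cons col rest ih =>
    simp only [pvGoA, List.filter_cons]
    by_cases h : PySem.List.pyGetD row col "" = "?"
    · simp [h, ih]
    · by_cases hm : PySem.List.pyGetD row col "" ∈ allowed
      · simp [h, hm, pvGoA_some]
      · simp [h, hm]

-- ===== VERDICT (by name: the statement is the Claim_ definition above) =====
theorem maxWidthFrom_spec : Claim_equal_maxWidthFrom := by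
  intro cake r c allowed _ _
  unfold Spec_maxWidthFrom maxWidthFrom maxWidthFrom_alt
  simp only [pvGoA_none]
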